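-- pv_equiv track=rewrite | github.com/rare-panda/Machine-Learning | Naive Bayes and Logistic Regression for Text Classification/NaiveBayes.py | update_vocabulary
-- ===== SOURCE A (Python) =====
-- def update_vocabulary(vocabulary, words,folder_name):
--     if folder_name == 'Spam':
--         folder_no = 0
--     else:
--         folder_no = 1
--
--     for word in words:
--         if not word in vocabulary:
--             vocabulary[word] = [0,0]
--         vocabulary[word][folder_no] += 1
--     return vocabulary
-- ===== SOURCE B (Python) =====
-- def update_vocabulary(vocabulary, words, folder_name):
--     col = 0 if folder_name == 'Spam' else 1
--     counts = {}
--     for w in words: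
--         counts[w] = counts.get(w, 0) + 1
--     out = {}
--     for key, value in vocabulary.items():
--         c = counts.get(key, 0)
--         if c:
--             value = value.copy()
--             value[col] += c
--         out[key] = value
--     for word, c in counts.items():
--         if word not in out:
--             row = [0, 0]
--             row[col] = c
--             out[word] = row
--     return out
-- ===== Notes on version B (the rewrite author's own statement) =====
-- stated objective: alternative
-- what changed: Replaces A's per-occurrence mutate-as-you-go loop (membership test + in-place increment for every word token) with a count-first pipeline: build a word-count dict once, then bump each existing vocabulary row by its aggregate count in a single pass over the vocabulary, then append one fresh row per new counted word; B returns a fresh dict instead of mutating its argument.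
import Mathlib
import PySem

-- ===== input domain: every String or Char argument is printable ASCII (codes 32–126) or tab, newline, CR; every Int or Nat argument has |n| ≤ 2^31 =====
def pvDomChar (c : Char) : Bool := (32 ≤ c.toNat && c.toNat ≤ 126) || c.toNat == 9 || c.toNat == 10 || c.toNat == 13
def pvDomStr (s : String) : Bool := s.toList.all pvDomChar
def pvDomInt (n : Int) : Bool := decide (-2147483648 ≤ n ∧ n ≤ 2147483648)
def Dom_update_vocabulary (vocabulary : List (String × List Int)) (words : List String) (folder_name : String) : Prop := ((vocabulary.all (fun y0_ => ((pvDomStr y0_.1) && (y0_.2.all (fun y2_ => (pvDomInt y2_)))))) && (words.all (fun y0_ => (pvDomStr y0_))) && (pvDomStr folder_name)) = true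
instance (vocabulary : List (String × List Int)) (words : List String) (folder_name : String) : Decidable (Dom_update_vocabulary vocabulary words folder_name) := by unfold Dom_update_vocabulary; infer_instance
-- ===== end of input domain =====

-- B replaces A's per-token mutate-as-you-go loop by a count-first pipeline (count words once,
-- bump each vocabulary row by its aggregate count, append rows for new words); equivalence is
-- about the RETURN value: A mutates and returns its `vocabulary` argument, B builds a fresh dict.

-- ===== PORT A =====
-- `vocabulary[word][folder_no] += 1` is ported as set/getD on the row; exact whenever
-- folder_no < row length (guaranteed by Pre_; Python raises IndexError otherwise).
def update_vocabulary (vocabulary : List (String × List Int)) (words : List String) (folder_name : String) : List (String × List Int) :=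
  let folder_no : Nat := if folder_name == "Spam" then 0 else 1
  (words.foldl
    (fun d word =>
      let d := if d.contains word then d else d.insert word [0, 0]
      d.modify word [0, 0] (fun v => v.set folder_no (v.getD folder_no 0 + 1)))
    (PySem.Dict.mk vocabulary)).items

-- ===== PORT B =====
def update_vocabulary_alt (vocabulary : List (String × List Int)) (words : List String) (folder_name : String) : List (String × List Int) :=
  let col : Nat := if folder_name == "Spam" then 0 else 1
  let counts : PySem.Dict String Int :=
    words.foldl (fun counts w => counts.insert w (counts.getD w 0 + 1)) PySem.Dict.empty
  let out : PySem.Dict String (List Int) :=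
    vocabulary.foldl
      (fun out kv =>
        let c := counts.getD kv.1 0
        let value := if c ≠ 0 then kv.2.set col (kv.2.getD col 0 + c) else kv.2
        out.insert kv.1 value)
      PySem.Dict.empty
  (counts.items.foldl
    (fun out wc =>
      if !(out.contains wc.1) then out.insert wc.1 (([0, 0] : List Int).set col wc.2)
      else out)
    out).items

-- ===== PRECONDITION & SPEC =====
-- Pre_ excludes (a) association lists with duplicate keys — a Python dict can never contain them,
-- so no Python input reaches the ports there — and (b) inputs on which some word of `words` is
-- already mapped to a row shorter than the folder index: there BOTH Pythons raise IndexError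
-- (A at `vocabulary[word][folder_no] += 1`, B at `value[col] += c`), so A returns no value.
def Pre_update_vocabulary (vocabulary : List (String × List Int)) (words : List String) (folder_name : String) : Prop :=
  (vocabulary.map Prod.fst).Nodup ∧
  ∀ kv ∈ vocabulary, kv.1 ∈ words → (if folder_name == "Spam" then 0 else 1) < kv.2.length
instance (vocabulary : List (String × List Int)) (words : List String) (folder_name : String) : Decidable (Pre_update_vocabulary vocabulary words folder_name) := by unfold Pre_update_vocabulary; infer_instance

def pvWitness_update_vocabulary : (List (String × List Int)) × List String × String :=
  ([("hi", [1, 2])], ["hi", "new", "hi"], "Spam")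

def Spec_update_vocabulary (vocabulary : List (String × List Int)) (words : List String) (folder_name : String) (out : List (String × List Int)) : Prop := out = update_vocabulary_alt vocabulary words folder_name
instance (vocabulary : List (String × List Int)) (words : List String) (folder_name : String) (out : List (String × List Int)) : Decidable (Spec_update_vocabulary vocabulary words folder_name out) := by unfold Spec_update_vocabulary; infer_instance

-- ===== CLAIM (what is proved, stated in full; the proofs are below) =====
def Claim_equal_update_vocabulary : Prop := ∀ (vocabulary : List (String × List Int)) (words : List String) (folder_name : String), Dom_update_vocabulary vocabulary words folder_name → Pre_update_vocabulary vocabulary words folder_name → Spec_update_vocabulary vocabulary words folder_name (update_vocabulary vocabulary words folder_name)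

-- ===== LEMMAS AND PROOFS =====

-- proof-side abbreviation: one `row[col] += c`
def pvBump (col : Nat) (c : Int) (v : List Int) : List Int := v.set col (v.getD col 0 + c)

-- proof-side: the new keys A appends, in order of first appearance, given already-present keys ks
def pvNew (ks : List String) : List String → List String
  | [] => []
  | w :: ws => if w ∈ ks then pvNew ks ws else w :: pvNew (w :: ks) ws

lemma pvNew_cons (ks : List String) (w : String) (ws : List String) :
    pvNew ks (w :: ws) = if w ∈ ks then pvNew ks ws else w :: pvNew (w :: ks) ws := rfl

lemma pvBump_zero (col : Nat) (v : List Int) : pvBump col 0 v = v := by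
  unfold pvBump
  by_cases h : col < v.length
  · rw [List.getD_eq_getElem v 0 h, add_zero, List.set_getElem_self]
  · exact List.set_eq_of_length_le (by omega)

lemma pvBump_pvBump (col : Nat) (a b : Int) (v : List Int) :
    pvBump col b (pvBump col a v) = pvBump col (a + b) v := by
  unfold pvBump
  by_cases h : col < v.length
  · have h' : col < (v.set col (v.getD col 0 + a)).length := by simpa using h
    rw [List.getD_eq_getElem _ 0 h', List.getElem_set_self, List.set_set,
        List.getD_eq_getElem v 0 h, add_assoc]
  · have h2 : v.length ≤ col := by omega
    simp [List.set_eq_of_length_le h2]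

lemma pvNew_congr (ks ks' : List String) (h : ∀ x, x ∈ ks ↔ x ∈ ks') :
    ∀ ws, pvNew ks ws = pvNew ks' ws := by
  intro ws
  induction ws generalizing ks ks' with
  | nil => rfl
  | cons w ws ih =>
    unfold pvNew
    by_cases hw : w ∈ ks
    · rw [if_pos hw, if_pos ((h w).mp hw)]
      exact ih ks ks' h
    · rw [if_neg hw, if_neg (fun c => hw ((h w).mpr c))]
      exact congrArg (w :: ·) (ih (w :: ks) (w :: ks') (by intro x; simp [h x]))

lemma pvNew_mem (ks : List String) (ws : List String) (u : String) (hu : u ∈ pvNew ks ws) :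
    u ∉ ks := by
  induction ws generalizing ks with
  | nil => simp [pvNew] at hu
  | cons w ws ih =>
    unfold pvNew at hu
    by_cases hw : w ∈ ks
    · rw [if_pos hw] at hu; exact ih ks hu
    · rw [if_neg hw] at hu
      rcases List.mem_cons.mp hu with h | h
      · subst h; exact hw
      · have := ih (w :: ks) h; intro c; exact this (List.mem_cons_of_mem _ c)

-- pvNew is the filter of the first-appearance dedup
lemma pvNew_eq_filter_ofList_gen (ws : List String) :
    ∀ (s : PySem.Set String) (ks : List String),
      (List.foldl PySem.Set.add s ws).filter (fun w => decide (w ∉ ks)) =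
        s.filter (fun w => decide (w ∉ ks)) ++ pvNew (ks ++ s) ws := by
  induction ws with
  | nil => intro s ks; simp [pvNew]
  | cons w ws ih =>
    intro s ks
    simp only [List.foldl_cons]
    by_cases hs : w ∈ s
    · have hadd : PySem.Set.add s w = s := by simp [PySem.Set.add, hs]
      have hpv : pvNew (ks ++ s) (w :: ws) = pvNew (ks ++ s) ws := by
        rw [pvNew_cons, if_pos (List.mem_append.mpr (Or.inr hs))]
      rw [hadd, hpv, ih s ks]
    · have hadd : PySem.Set.add s w = s ++ [w] := by simp [PySem.Set.add, hs]
      rw [hadd, ih (s ++ [w]) ks, List.filter_append]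
      by_cases hk : w ∈ ks
      · have hf : [w].filter (fun w => decide (w ∉ ks)) = [] := by
          simp [hk]
        have hpv : pvNew (ks ++ s) (w :: ws) = pvNew (ks ++ s) ws := by
          rw [pvNew_cons, if_pos (List.mem_append.mpr (Or.inl hk))]
        rw [hf, List.append_nil, hpv]
        refine congrArg (_ ++ ·) (pvNew_congr _ _ (fun x => ?_) ws)
        simp
        constructor
        · rintro (h | h | rfl)
          exacts [Or.inl h, Or.inr h, Or.inl hk]
        · rintro (h | h)
          exacts [Or.inl h, Or.inr (Or.inl h)]
      · have hf : [w].filter (fun w => decide (w ∉ ks)) = [w] := by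
          simp [hk]
        have hpv : pvNew (ks ++ s) (w :: ws) = w :: pvNew (w :: (ks ++ s)) ws := by
          rw [pvNew_cons, if_neg (by simp [hk, hs])]
        rw [hf, hpv, List.append_assoc, List.singleton_append]
        refine congrArg (_ ++ w :: ·) (pvNew_congr _ _ (fun x => ?_) ws)
        simp
        tauto

lemma pvNew_eq_filter_ofList (ws ks : List String) :
    (PySem.Set.ofList ws).filter (fun w => decide (w ∉ ks)) = pvNew ks ws := by
  have := pvNew_eq_filter_ofList_gen ws PySem.Set.empty ks
  simpa [PySem.Set.ofList, PySem.Set.empty] using this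

-- characterisation of A's loop
lemma lemA (col : Nat) (hcol : col < 2) (words : List String) :
    ∀ (d : PySem.Dict String (List Int)), d.keys.Nodup →
      (words.foldl
        (fun d word =>
          let d := if d.contains word then d else d.insert word [0, 0]
          d.modify word [0, 0] (fun v => v.set col (v.getD col 0 + 1))) d).items =
      d.items.map (fun kv => (kv.1, pvBump col (words.count kv.1 : Int) kv.2)) ++
        (pvNew d.keys words).map (fun w => (w, ([0, 0] : List Int).set col (words.count w : Int))) := by
  induction words with
  | nil =>
    intro d hd
    simp [pvNew, pvBump_zero]
  | cons w ws ih =>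
    intro d hd
    rw [List.foldl_cons]
    by_cases hb : d.contains w = true
    · -- w already present: the step bumps its row in place
      have hc : d.contains w = true := hb
      have hwmem : w ∈ d.keys := (PySem.Dict.contains_iff_mem_keys d w).mp hc
      have hstep :
          ((if d.contains w then d else d.insert w [0, 0]).modify w [0, 0]
            (fun v => v.set col (v.getD col 0 + 1))) =
          d.insert w ((d.getD w [0, 0]).set col ((d.getD w [0, 0]).getD col 0 + 1)) := by
        rw [if_pos hc]
        simp only [PySem.Dict.modify]
      rw [hstep]
      have hd' : (d.insert w ((d.getD w [0, 0]).set col ((d.getD w [0, 0]).getD col 0 + 1))).keys.Nodup := by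
        rw [PySem.Dict.keys_insert_of_contains d _ hc]; exact hd
      rw [ih _ hd']
      rw [PySem.Dict.items_insert_of_contains d _ hc,
          PySem.Dict.keys_insert_of_contains d _ hc]
      rw [List.map_map]
      congr 1
      · -- old entries
        refine List.map_congr_left (fun p hp => ?_)
        by_cases hpw : p.1 = w
        · have hget : d.getD w [0, 0] = p.2 := by
            have : (w, p.2) ∈ d.items := by rw [← hpw]; exact hp
            exact PySem.Dict.getD_of_mem_items d this hd [0, 0]
          have hcnt : (w :: ws).count p.1 = ws.count p.1 + 1 := by
            rw [hpw, List.count_cons_self]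
          simp only [Function.comp_apply, hpw, beq_self_eq_true, if_true, hget]
          have hb1 : p.2.set col (p.2.getD col 0 + 1) = pvBump col 1 p.2 := rfl
          rw [hb1, pvBump_pvBump, List.count_cons_self]
          congr 1
          push_cast
          ring_nf
        · have hpw' : ¬(w = p.1) := fun h => hpw h.symm
          have hcnt : (w :: ws).count p.1 = ws.count p.1 := by
            rw [List.count_cons, if_neg (by simp [hpw'])]
            omega
          simp only [Function.comp_apply, if_neg (by simp [hpw] : ¬(p.1 == w) = true), hcnt]
      · -- new keys: w is not among them
        rw [pvNew_cons, if_pos hwmem]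
        refine List.map_congr_left (fun u hu => ?_)
        have huw : u ≠ w := fun h => pvNew_mem _ _ u hu (h ▸ hwmem)
        have huw' : ¬(w = u) := fun h => huw h.symm
        have : (w :: ws).count u = ws.count u := by
          rw [List.count_cons, if_neg (by simp [huw'])]
          omega
        rw [this]
    · -- w is a NEW key: the step appends (w, [0,0] bumped once)
      have hc : d.contains w = false := by simpa using hb
      have hw : w ∉ d.keys := fun hmem => by
        simp [(PySem.Dict.contains_iff_mem_keys d w).mpr hmem] at hc
      have h00 : (([0, 0] : List Int)).getD col 0 = 0 := by interval_cases col <;> rfl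
      have hstep :
          ((if d.contains w then d else d.insert w [0, 0]).modify w [0, 0]
            (fun v => v.set col (v.getD col 0 + 1))) =
          d.insert w (([0, 0] : List Int).set col 1) := by
        rw [if_neg (by simp [hc])]
        simp only [PySem.Dict.modify, PySem.Dict.getD_insert_self,
          PySem.Dict.insert_insert_self, h00, zero_add]
      rw [hstep]
      have hd' : (d.insert w (([0, 0] : List Int).set col 1)).keys.Nodup := by
        rw [PySem.Dict.keys_insert_of_not_contains d _ hc]
        simp only [List.nodup_append, List.nodup_singleton, true_and]
        constructor
        · exact hd
        · intro a ha b hb hab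
          have hbw : b = w := by simpa using hb
          exact hw (hbw ▸ hab ▸ ha)
      rw [ih _ hd']
      rw [PySem.Dict.items_insert_of_not_contains d _ hc,
          PySem.Dict.keys_insert_of_not_contains d _ hc]
      rw [List.map_append, List.append_assoc]
      congr 1
      · -- old entries: their keys differ from w, counts unchanged
        refine List.map_congr_left (fun p hp => ?_)
        have hpw : p.1 ≠ w := fun h => hw (h ▸ (List.mem_map_of_mem hp : p.1 ∈ d.items.map Prod.fst))
        have hpw' : ¬(w = p.1) := fun h => hpw h.symm
        have : (w :: ws).count p.1 = ws.count p.1 := by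
          rw [List.count_cons, if_neg (by simp [hpw'])]
          omega
        rw [this]
      · -- the new entry, then the remaining new keys
        rw [pvNew_cons, if_neg hw]
        simp only [List.map_cons, List.map_nil, List.cons_append, List.nil_append]
        have hrow : pvBump col (ws.count w : Int) (([0, 0] : List Int).set col 1) =
            ([0, 0] : List Int).set col (((w :: ws).count w : Int)) := by
          unfold pvBump
          have hlen : col < (([0, 0] : List Int).set col 1).length := by simpa using hcol
          rw [List.getD_eq_getElem _ 0 hlen, List.getElem_set_self, List.set_set,
              List.count_cons_self]
          push_cast
          ring_nf
        congr 1
        · exact congrArg (Prod.mk w) hrow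
        · rw [pvNew_congr (d.keys ++ [w]) (w :: d.keys) (by intro x; simp; tauto) ws]
          refine List.map_congr_left (fun u hu => ?_)
          have huw : u ≠ w := fun h => pvNew_mem _ _ u hu (h ▸ List.mem_cons_self)
          have huw' : ¬(w = u) := fun h => huw h.symm
          have : (w :: ws).count u = ws.count u := by
            rw [List.count_cons, if_neg (by simp [huw'])]
            omega
          rw [this]

-- characterisation of B's third loop
lemma lemB2 (col : Nat) (l : List (String × Int)) :
    ∀ (out : PySem.Dict String (List Int)), out.keys.Nodup → (l.map Prod.fst).Nodup →
      (l.foldl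
        (fun out wc =>
          if !(out.contains wc.1) then out.insert wc.1 (([0, 0] : List Int).set col wc.2)
          else out) out).items =
      out.items ++ (l.filter (fun wc => decide (wc.1 ∉ out.keys))).map
        (fun wc => (wc.1, ([0, 0] : List Int).set col wc.2)) := by
  induction l with
  | nil => intro out _ _; simp
  | cons wc l ih =>
    intro out hout hl
    rw [List.foldl_cons]
    by_cases hco : out.contains wc.1 = true
    · have hmem : wc.1 ∈ out.keys := (PySem.Dict.contains_iff_mem_keys out wc.1).mp hco
      have hstep : (if !(out.contains wc.1) then out.insert wc.1 (([0, 0] : List Int).set col wc.2)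
          else out) = out := by
        rw [hco]; rfl
      rw [hstep, ih out hout (by simpa using hl.of_cons)]
      congr 1
      rw [List.filter_cons, if_neg (by simpa using hmem)]
    · have hc : out.contains wc.1 = false := by simpa using hco
      have hmem : wc.1 ∉ out.keys := fun hmem => by
        simp [(PySem.Dict.contains_iff_mem_keys out wc.1).mpr hmem] at hc
      have hstep : (if !(out.contains wc.1) then out.insert wc.1 (([0, 0] : List Int).set col wc.2)
          else out) = out.insert wc.1 (([0, 0] : List Int).set col wc.2) := by
        rw [hc]; rfl
      rw [hstep]
      have hout' : (out.insert wc.1 (([0, 0] : List Int).set col wc.2)).keys.Nodup := by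
        rw [PySem.Dict.keys_insert_of_not_contains out _ hc]
        simp only [List.nodup_append, List.nodup_singleton, true_and]
        constructor
        · exact hout
        · intro a ha b hb hab
          have hbw : b = wc.1 := by simpa using hb
          exact hmem (hbw ▸ hab ▸ ha)
      rw [ih _ hout' (by simpa using hl.of_cons)]
      rw [PySem.Dict.items_insert_of_not_contains out _ hc,
          PySem.Dict.keys_insert_of_not_contains out _ hc]
      rw [List.filter_cons, if_pos (by simpa using hmem), List.map_cons, List.append_assoc,
          List.singleton_append]
      congr 2
      refine congrArg (List.map _) (List.filter_congr (fun u hu => ?_))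
      have hu1 : u.1 ≠ wc.1 := by
        have : wc.1 ∉ l.map Prod.fst := by
          have := hl
          simp only [List.map_cons, List.nodup_cons] at this
          exact this.1
        intro h
        exact this (h ▸ List.mem_map_of_mem hu)
      simp only [decide_eq_decide, List.mem_append, List.mem_singleton]
      constructor
      · exact fun h h2 => h (Or.inl h2)
      · intro h h2
        rcases h2 with h2 | h2
        exacts [h h2, hu1 h2]

-- ===== VERDICT (by name: the statement is the Claim_ definition above) =====
theorem update_vocabulary_spec : Claim_equal_update_vocabulary := by
  intro vocab words fn _ hpre
  obtain ⟨hnd, -⟩ := hpre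
  unfold Spec_update_vocabulary
  have hcol : (if fn == "Spam" then (0 : Nat) else 1) < 2 := by
    split <;> omega
  simp only [update_vocabulary, update_vocabulary_alt]
  rw [PySem.Dict.foldl_insert_getD_add_one_eq_counter]
  rw [lemA (if fn == "Spam" then (0 : Nat) else 1) hcol words (PySem.Dict.mk vocab) hnd]
  have hB1 : (List.foldl
      (fun out kv =>
        out.insert kv.1
          (if (PySem.Dict.counter words).getD kv.1 0 ≠ 0 then
            kv.2.set (if fn == "Spam" then (0 : Nat) else 1)
              (kv.2.getD (if fn == "Spam" then (0 : Nat) else 1) 0 + (PySem.Dict.counter words).getD kv.1 0)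
          else kv.2))
      PySem.Dict.empty vocab).items =
      vocab.map (fun kv => (kv.1,
        (if (PySem.Dict.counter words).getD kv.1 0 ≠ 0 then
          kv.2.set (if fn == "Spam" then (0 : Nat) else 1)
            (kv.2.getD (if fn == "Spam" then (0 : Nat) else 1) 0 + (PySem.Dict.counter words).getD kv.1 0)
        else kv.2))) := by
    have h := PySem.Dict.items_foldl_insert_fresh vocab (fun kv => kv.1)
      (fun kv =>
        (if (PySem.Dict.counter words).getD kv.1 0 ≠ 0 then
          kv.2.set (if fn == "Spam" then (0 : Nat) else 1)
            (kv.2.getD (if fn == "Spam" then (0 : Nat) else 1) 0 + (PySem.Dict.counter words).getD kv.1 0)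
        else kv.2))
      PySem.Dict.empty (fun a _ => rfl) hnd
    simpa using h
  set outF := (List.foldl
      (fun out kv =>
        out.insert kv.1
          (if (PySem.Dict.counter words).getD kv.1 0 ≠ 0 then
            kv.2.set (if fn == "Spam" then (0 : Nat) else 1)
              (kv.2.getD (if fn == "Spam" then (0 : Nat) else 1) 0 + (PySem.Dict.counter words).getD kv.1 0)
          else kv.2))
      PySem.Dict.empty vocab) with houtF
  have hK : outF.keys = vocab.map Prod.fst := by
    have h1 : outF.keys = outF.items.map Prod.fst := rfl
    rw [h1, hB1, List.map_map]
    rfl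
  have hKnd : outF.keys.Nodup := by rw [hK]; exact hnd
  have hlnd : ((PySem.Dict.counter words).items.map Prod.fst).Nodup := by
    have hid : (Prod.fst ∘ fun k => (k, (List.count k words : Int))) = id := rfl
    rw [PySem.Dict.items_counter, List.map_map, hid, List.map_id]
    exact PySem.Set.nodup_ofList words
  rw [lemB2 (if fn == "Spam" then (0 : Nat) else 1) (PySem.Dict.counter words).items outF hKnd hlnd]
  rw [hB1, hK, PySem.Dict.items_counter]
  rw [List.filter_map, List.map_map]
  rw [show ((fun wc => decide (wc.1 ∉ List.map Prod.fst vocab)) ∘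
        (fun k => (k, (List.count k words : Int)))) =
      (fun w => decide (w ∉ List.map Prod.fst vocab)) from rfl]
  rw [pvNew_eq_filter_ofList words (vocab.map Prod.fst)]
  congr 1
  refine List.map_congr_left (fun kv _ => ?_)
  rw [PySem.Dict.getD_counter]
  by_cases h0 : ((List.count kv.1 words : Int)) = 0
  · rw [h0, pvBump_zero]
    simp
  · rw [if_pos h0]
    rfl
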